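-- pv_equiv track=rewrite | github.com/posl/comment_recommendation | script/split_gen/1_time/zh/140_D/5.py | solve
-- ===== SOURCE A (Python) =====
-- def solve(s, k):
--     n = len(s)
--     # 从左到右，计算每个人在原始方向上是否快乐
--     happy = [0] * n
--     for i in range(1, n):
--         if s[i - 1] == s[i]:
--             happy[i] = 1
--     # 从左到右，计算每个人在原始方向上的快乐累计值
--     happy_sum = [0] * n
--     happy_sum[0] = happy[0]
--     for i in range(1, n):
--         happy_sum[i] = happy_sum[i - 1] + happy[i]
--     # 从右到左，计算每个人在反方向上是否快乐
--     happy_rev = [0] * n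
--     for i in range(n - 2, -1, -1):
--         if s[i + 1] == s[i]:
--             happy_rev[i] = 1
--     # 从右到左，计算每个人在反方向上的快乐累计值
--     happy_rev_sum = [0] * n
--     happy_rev_sum[n - 1] = happy_rev[n - 1]
--     for i in range(n - 2, -1, -1):
--         happy_rev_sum[i] = happy_rev_sum[i + 1] + happy_rev[i]
--     # 从左到右，计算每个人经过k次操作后的快乐值
--     happy_k = [0] * n
--     for i in range(n):
--         happy_k[i] = happy_sum[i]
--         if i + k < n:
--             happy_k[i] += happy_rev_sum[i + k]
--     return max(happy_k)
-- ===== SOURCE B (Python) =====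
-- def solve(s, k):
--     # Sliding-window alternative: total adjacent-equal pairs minus the minimum
--     # number of pairs inside the length-k window starting at each position,
--     # maintained in one pass with O(1) extra space (no prefix/suffix arrays).
--     n = len(s)
--     total = 0
--     for t in range(1, n):
--         if s[t - 1] == s[t]:
--             total += 1
--     if k <= 0:
--         # reversing a segment of non-positive length changes nothing
--         return total
--     win = 0
--     for t in range(1, min(k, n - 1) + 1):
--         if s[t - 1] == s[t]:
--             win += 1
--     best = win
--     for i in range(1, n):
--         if s[i - 1] == s[i]:
--             win -= 1
--         if i + k < n and s[i + k - 1] == s[i + k]: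
--             win += 1
--         if win < best:
--             best = win
--     return total - best
-- ===== Notes on version B (the rewrite author's own statement) =====
-- stated objective: alternative
-- what changed: B replaces A's five prefix/suffix array passes and per-index maximization by a sliding-window algorithm: one pass maintains the count of adjacent-equal pairs inside the length-k window with O(1) extra space and a running minimum, returning total pairs minus that minimum.
-- intended difference: For in-range negative k (-len(s) < k < 0) on strings containing an adjacent equal pair, A's negative-index wraparound into happy_rev_sum makes it return a value exceeding the total number of happy pairs (an impossible happiness), while B treats a non-positive-length reversal as a no-op and returns the total, the intended value. — e.g. on solve("aa", -1): A returns 2, B returns 1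
import Mathlib
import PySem

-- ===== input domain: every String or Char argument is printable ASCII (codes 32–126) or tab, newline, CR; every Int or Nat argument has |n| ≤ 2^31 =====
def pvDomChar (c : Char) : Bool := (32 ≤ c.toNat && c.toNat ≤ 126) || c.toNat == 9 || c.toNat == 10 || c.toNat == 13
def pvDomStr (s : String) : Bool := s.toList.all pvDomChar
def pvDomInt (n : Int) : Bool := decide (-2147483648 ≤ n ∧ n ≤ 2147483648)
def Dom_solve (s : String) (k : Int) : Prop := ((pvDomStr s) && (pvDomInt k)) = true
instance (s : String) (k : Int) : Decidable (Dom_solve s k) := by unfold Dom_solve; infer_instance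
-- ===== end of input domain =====

-- B replaces A's five prefix/suffix arrays by a one-pass sliding-window minimum with O(1) extra
-- space; on in-range negative k (where A's negative-index wraparound返回s impossible values) B
-- intentionally returns the total instead (see D_solve below).

-- ===== PORT A =====
-- Literal port of A: five passes, each a foldl over the same range writing into a list (pySetD),
-- reads via pyGetD (all in range under Pre_solve), final max(happy_k) via max? (nonempty under Pre_solve).
def solve (s : String) (k : Int) : Int :=
  let cs := s.toList
  let n : Int := PySem.Str.len s
  let happy : List Int :=
    (PySem.List.pyRange 1 n 1).foldl (fun h i =>
      if PySem.List.pyGet? cs (i - 1) = PySem.List.pyGet? cs i then PySem.List.pySetD h i 1 else h)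
      (List.replicate n.toNat 0)
  let happy_sum : List Int :=
    (PySem.List.pyRange 1 n 1).foldl (fun h i =>
      PySem.List.pySetD h i (PySem.List.pyGetD h (i - 1) 0 + PySem.List.pyGetD happy i 0))
      (PySem.List.pySetD (List.replicate n.toNat 0) 0 (PySem.List.pyGetD happy 0 0))
  let happy_rev : List Int :=
    (PySem.List.pyRange (n - 2) (-1) (-1)).foldl (fun h i =>
      if PySem.List.pyGet? cs (i + 1) = PySem.List.pyGet? cs i then PySem.List.pySetD h i 1 else h)
      (List.replicate n.toNat 0)
  let happy_rev_sum : List Int :=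
    (PySem.List.pyRange (n - 2) (-1) (-1)).foldl (fun h i =>
      PySem.List.pySetD h i (PySem.List.pyGetD h (i + 1) 0 + PySem.List.pyGetD happy_rev i 0))
      (PySem.List.pySetD (List.replicate n.toNat 0) (n - 1) (PySem.List.pyGetD happy_rev (n - 1) 0))
  let happy_k : List Int :=
    (PySem.List.pyRange 0 n 1).foldl (fun h i =>
      PySem.List.pySetD h i
        (PySem.List.pyGetD happy_sum i 0 +
          (if i + k < n then PySem.List.pyGetD happy_rev_sum (i + k) 0 else 0)))
      (List.replicate n.toNat 0)
  (PySem.List.max? happy_k (fun x => x)).getD 0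

-- ===== PORT B =====
-- Literal port of B: total-pairs loop, then (for k > 0) the initial-window loop and the single
-- sliding-window pass carrying the pair (win, best).
def solve_alt (s : String) (k : Int) : Int :=
  let cs := s.toList
  let n : Int := PySem.Str.len s
  let total : Int :=
    (PySem.List.pyRange 1 n 1).foldl (fun t i =>
      if PySem.List.pyGet? cs (i - 1) = PySem.List.pyGet? cs i then t + 1 else t) 0
  if k ≤ 0 then total
  else
    let win : Int :=
      (PySem.List.pyRange 1 (min k (n - 1) + 1) 1).foldl (fun w i =>
        if PySem.List.pyGet? cs (i - 1) = PySem.List.pyGet? cs i then w + 1 else w) 0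
    let p :=
      (PySem.List.pyRange 1 n 1).foldl (fun (wb : Int × Int) i =>
        let w1 := if PySem.List.pyGet? cs (i - 1) = PySem.List.pyGet? cs i then wb.1 - 1 else wb.1
        let w2 := if i + k < n ∧ PySem.List.pyGet? cs (i + k - 1) = PySem.List.pyGet? cs (i + k)
                  then w1 + 1 else w1
        (w2, if w2 < wb.2 then w2 else wb.2)) (win, win)
    total - p.2

-- ===== PRECONDITION & SPEC =====
-- Pre_solve is exactly A's return domain: on s = "" A raises IndexError (happy_sum[0]), and
-- for k < -len(s) A raises IndexError at happy_rev_sum[i+k] (i = 0).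
def Pre_solve (s : String) (k : Int) : Prop :=
  1 ≤ PySem.Str.len s ∧ -(PySem.Str.len s) ≤ k
instance (s : String) (k : Int) : Decidable (Pre_solve s k) := by unfold Pre_solve; infer_instance

def pvWitness_solve : String × Int := ("aab", 1)

-- For in-range negative k (-len(s) < k < 0) on strings containing an adjacent equal pair, A's
-- negative-index wraparound into happy_rev_sum makes it return a value exceeding the total number
-- of happy pairs (impossible happiness); B treats a non-positive-length reversal as a no-op and
-- returns the total, the intended value.
def D_solve (s : String) (k : Int) : Prop :=
  (-(PySem.Str.len s) < k ∧ k < 0) ∧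
    (s.toList.zip (s.toList.drop 1)).any (fun p => p.1 == p.2) = true
instance (s : String) (k : Int) : Decidable (D_solve s k) := by unfold D_solve; infer_instance

def Spec_solve (s : String) (k : Int) (out : Int) : Prop := ¬ D_solve s k → out = solve_alt s k
instance (s : String) (k : Int) (out : Int) : Decidable (Spec_solve s k out) := by
  unfold Spec_solve; infer_instance

def pvDiffWitness_solve : String × Int := ("aa", -1)
def pvDiffWitnessOut_solve : Int × Int := (2, 1)

-- ===== CLAIM (what is proved, stated in full; the proofs are below) =====
def Claim_unchanged_solve : Prop :=
  ∀ (s : String) (k : Int), Dom_solve s k → Pre_solve s k → Spec_solve s k (solve s k)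
def Claim_changed_solve : Prop :=
  Dom_solve (pvDiffWitness_solve.1) (pvDiffWitness_solve.2) ∧
    Pre_solve (pvDiffWitness_solve.1) (pvDiffWitness_solve.2) ∧
    D_solve (pvDiffWitness_solve.1) (pvDiffWitness_solve.2) ∧
    solve (pvDiffWitness_solve.1) (pvDiffWitness_solve.2) = pvDiffWitnessOut_solve.1 ∧
    solve_alt (pvDiffWitness_solve.1) (pvDiffWitness_solve.2) = pvDiffWitnessOut_solve.2 ∧
    pvDiffWitnessOut_solve.1 ≠ pvDiffWitnessOut_solve.2
def Claim_exact_solve : Prop :=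
  ∀ (s : String) (k : Int), Dom_solve s k → Pre_solve s k → D_solve s k →
    solve s k ≠ solve_alt s k

-- ===== LEMMAS AND PROOFS =====

-- E cs j : the forward "happy" indicator of position j (0 at j = 0).
def Eind (cs : List Char) (j : Nat) : Int :=
  if 0 < j ∧ cs[j-1]? = cs[j]? then 1 else 0

-- S cs j : prefix sum of Eind over 0..j.
def Ssum (cs : List Char) (j : Nat) : Int :=
  ∑ t ∈ Finset.range (j + 1), Eind cs t

-- R cs j : the backward indicator A computes.
def Rind (cs : List Char) (j : Nat) : Int :=
  if j + 1 < cs.length ∧ cs[j+1]? = cs[j]? then 1 else 0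

-- RS cs j : suffix sum of Rind over j..n-1.
def RSsum (cs : List Char) (j : Nat) : Int :=
  ∑ t ∈ Finset.Ico j cs.length, Rind cs t

-- W cs kn i : pairs inside B's window (i, min(i+kn, n-1)].
def Wf (cs : List Char) (kn : Nat) (i : Nat) : Int :=
  Ssum cs (min (i + kn) (cs.length - 1)) - Ssum cs i

-- bstF g m : running minimum of g over 0..m (B's `best`).
def bstF (g : Nat → Int) : Nat → Int
  | 0 => g 0
  | m + 1 => min (bstF g m) (g (m + 1))

-- generic list helpers for the set-into-map loops
lemma map_range_congr (n : Nat) (f g : Nat → Int) (h : ∀ j, j < n → f j = g j) :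
    (List.range n).map f = (List.range n).map g := by
  apply List.map_congr_left
  intro a ha
  exact h a (List.mem_range.mp ha)

lemma replicate_eq_map_range (n : Nat) :
    List.replicate n (0 : Int) = (List.range n).map (fun _ => (0 : Int)) := by
  simp [List.map_const']

lemma set_map_range (n m : Nat) (f g : Nat → Int) (v : Int) (hm : m < n)
    (hv : g m = v) (hagree : ∀ j, j < n → j ≠ m → f j = g j) :
    ((List.range n).map f).set m v = (List.range n).map g := by
  apply List.ext_getElem
  · simp
  · intro j h1 h2
    simp only [List.getElem_set, List.getElem_map, List.getElem_range]
    by_cases hj : j = m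
    · subst hj; simp [hv]
    · rw [if_neg (by omega)]
      exact hagree j (by simpa using h1) hj

lemma getD_map_range_ite (n j : Nat) (g : Nat → Int) :
    ((List.range n).map g).getD j 0 = if j < n then g j else 0 := by
  by_cases h : j < n
  · rw [List.getD_eq_getElem _ _ (by simpa using h)]
    simp [h]
  · rw [List.getD_eq_default _ _ (by simpa using Nat.le_of_not_lt h)]
    simp [h]

-- arithmetic facts about the spec functions
lemma Eind_zero (cs : List Char) : Eind cs 0 = 0 := by simp [Eind]

lemma Eind_nonneg (cs : List Char) (t : Nat) : 0 ≤ Eind cs t := by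
  unfold Eind; split_ifs <;> norm_num

lemma Ssum_succ (cs : List Char) (j : Nat) :
    Ssum cs (j + 1) = Ssum cs j + Eind cs (j + 1) := by
  simp [Ssum, Finset.sum_range_succ]

lemma Ssum_zero (cs : List Char) : Ssum cs 0 = 0 := by
  simp [Ssum, Eind_zero]

lemma RSsum_len (cs : List Char) : RSsum cs cs.length = 0 := by
  simp [RSsum]

lemma RSsum_bot (cs : List Char) (j : Nat) (hj : j < cs.length) :
    RSsum cs j = Rind cs j + RSsum cs (j + 1) := by
  simp [RSsum, Finset.sum_eq_sum_Ico_succ_bot hj]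

lemma Rind_eq_Eind_succ (cs : List Char) (j : Nat) (hj : j < cs.length) :
    Rind cs j = Eind cs (j + 1) := by
  unfold Rind Eind
  simp only [Nat.add_sub_cancel]
  by_cases h : j + 1 < cs.length
  · simp only [h, true_and]
    have hiff : (cs[j+1]? = cs[j]?) ↔ (0 < j + 1 ∧ cs[j]? = cs[j+1]?) := by
      constructor
      · intro hc; exact ⟨Nat.succ_pos j, hc.symm⟩
      · intro hc; exact hc.2.symm
    rw [if_congr hiff rfl rfl]
  · have h1 : cs[j+1]? = none := by rw [List.getElem?_eq_none_iff]; omega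
    have h2 : cs[j]? = some cs[j] := List.getElem?_eq_getElem hj
    simp [h, h2]

lemma Eind_len (cs : List Char) (hn : 1 ≤ cs.length) : Eind cs cs.length = 0 := by
  unfold Eind
  have h1 : cs[cs.length]? = none := by rw [List.getElem?_eq_none_iff]
  have h2 : cs[cs.length - 1]? = some cs[cs.length - 1] := List.getElem?_eq_getElem (by omega)
  simp [h2]

lemma RS_eq_total_sub (cs : List Char) (j : Nat) (hn : 1 ≤ cs.length) (hj : j < cs.length) :
    RSsum cs j = Ssum cs (cs.length - 1) - Ssum cs j := by
  have h1 : RSsum cs j = ∑ t ∈ Finset.Ico j cs.length, Eind cs (t + 1) := by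
    exact Finset.sum_congr rfl (fun t ht => Rind_eq_Eind_succ cs t (Finset.mem_Ico.mp ht).2)
  have h2 : ∑ t ∈ Finset.Ico j cs.length, Eind cs (t + 1)
      = ∑ t ∈ Finset.Ico (j + 1) (cs.length + 1), Eind cs t := by
    rw [← Finset.sum_Ico_add' (fun t => Eind cs t) j cs.length 1]
  have h3 : ∑ t ∈ Finset.Ico (j + 1) (cs.length + 1), Eind cs t
      = ∑ t ∈ Finset.Ico (j + 1) cs.length, Eind cs t + Eind cs cs.length :=
    Finset.sum_Ico_succ_top (by omega) _
  have h4 : ∑ t ∈ Finset.Ico (j + 1) cs.length, Eind cs t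
      = ∑ t ∈ Finset.range cs.length, Eind cs t - ∑ t ∈ Finset.range (j + 1), Eind cs t :=
    Finset.sum_Ico_eq_sub _ (by omega)
  unfold Ssum
  rw [h1, h2, h3, h4, Eind_len cs hn]
  have : cs.length - 1 + 1 = cs.length := by omega
  rw [this]; ring

-- characterizations of A's five arrays
lemma happy_eq (cs : List Char) :
    (PySem.List.pyRange 1 (cs.length : Int) 1).foldl (fun h i =>
      if PySem.List.pyGet? cs (i - 1) = PySem.List.pyGet? cs i then PySem.List.pySetD h i 1 else h)
      (List.replicate cs.length 0)
    = (List.range cs.length).map (Eind cs) := by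
  have aux : ∀ m : Nat, m ≤ cs.length →
      (PySem.List.pyRange 1 (m : Int) 1).foldl (fun h i =>
        if PySem.List.pyGet? cs (i - 1) = PySem.List.pyGet? cs i then PySem.List.pySetD h i 1 else h)
        (List.replicate cs.length 0)
      = (List.range cs.length).map (fun j => if j < m then Eind cs j else 0) := by
    intro m
    induction m with
    | zero =>
      intro _
      rw [PySem.List.pyRange_one_eq_nil (by norm_num), List.foldl_nil, replicate_eq_map_range]
      exact map_range_congr _ _ _ (by intro j hj; simp)
    | succ m ih =>
      intro hm
      by_cases hm0 : m = 0
      · subst hm0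
        rw [show ((0 + 1 : Nat) : Int) = 1 by norm_num,
          PySem.List.pyRange_one_eq_nil (by norm_num), List.foldl_nil, replicate_eq_map_range]
        apply map_range_congr
        intro j hj
        rcases Nat.eq_zero_or_pos j with h0 | h0
        · subst h0; simp [Eind_zero]
        · rw [if_neg (by omega)]
      · have h1m : 1 ≤ m := Nat.one_le_iff_ne_zero.mpr hm0
        rw [show ((m + 1 : Nat) : Int) = (m : Int) + 1 by push_cast; ring,
          PySem.List.pyRange_one_succ_right (by exact_mod_cast h1m), List.foldl_append,
          ih (by omega), List.foldl_cons, List.foldl_nil,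
          show ((m : Int) - 1) = ((m - 1 : Nat) : Int) by omega,
          PySem.List.pyGet?_natCast, PySem.List.pyGet?_natCast]
        by_cases hc : cs[m-1]? = cs[m]?
        · rw [if_pos hc, PySem.List.pySetD_natCast]
          apply set_map_range _ _ _ _ _ (by omega)
          · rw [if_pos (by omega)]
            unfold Eind
            rw [if_pos ⟨by omega, hc⟩]
          · intro j hjn hj
            by_cases hjm : j < m
            · rw [if_pos hjm, if_pos (by omega)]
            · rw [if_neg hjm, if_neg (by omega)]
        · rw [if_neg hc]
          apply map_range_congr
          intro j hj
          by_cases hjm : j = m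
          · subst hjm
            rw [if_neg (by omega), if_pos (by omega)]
            unfold Eind
            rw [if_neg (by rintro ⟨-, h⟩; exact hc h)]
          · by_cases hjm' : j < m
            · rw [if_pos hjm', if_pos (by omega)]
            · rw [if_neg hjm', if_neg (by omega)]
  rw [aux cs.length le_rfl]
  exact map_range_congr _ _ _ (fun j hj => by rw [if_pos hj])

-- happy_sum characterization
lemma hsum_eq (cs : List Char) (hn : 1 ≤ cs.length) :
    (PySem.List.pyRange 1 (cs.length : Int) 1).foldl (fun h i =>
      PySem.List.pySetD h i (PySem.List.pyGetD h (i - 1) 0 +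
        PySem.List.pyGetD ((List.range cs.length).map (Eind cs)) i 0))
      (PySem.List.pySetD (List.replicate cs.length 0) 0
        (PySem.List.pyGetD ((List.range cs.length).map (Eind cs)) 0 0))
    = (List.range cs.length).map (Ssum cs) := by
  have hinit : PySem.List.pySetD (List.replicate cs.length 0) 0
      (PySem.List.pyGetD ((List.range cs.length).map (Eind cs)) 0 0)
      = (List.range cs.length).map (fun j => if j = 0 ∨ j < 0 then Ssum cs j else 0) := by
    rw [PySem.List.pyGetD_zero, PySem.List.pySetD_of_nonneg _ _ (le_refl (0 : Int)),
      show (0 : Int).toNat = 0 from rfl,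
      show ((List.range cs.length).map (Eind cs)).getD 0 0
        = if 0 < cs.length then Eind cs 0 else 0 from getD_map_range_ite cs.length 0 (Eind cs),
      if_pos (by omega), Eind_zero, replicate_eq_map_range]
    apply set_map_range _ _ _ _ _ (by omega)
    · rw [if_pos (by omega), Ssum_zero]
    · intro j hjn hj; rw [if_neg (by omega)]
  have aux : ∀ m : Nat, m ≤ cs.length →
      (PySem.List.pyRange 1 (m : Int) 1).foldl (fun h i =>
        PySem.List.pySetD h i (PySem.List.pyGetD h (i - 1) 0 +
          PySem.List.pyGetD ((List.range cs.length).map (Eind cs)) i 0))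
        ((List.range cs.length).map (fun j => if j = 0 ∨ j < 0 then Ssum cs j else 0))
      = (List.range cs.length).map (fun j => if j = 0 ∨ j < m then Ssum cs j else 0) := by
    intro m
    induction m with
    | zero =>
      intro _
      rw [PySem.List.pyRange_one_eq_nil (by norm_num), List.foldl_nil]
    | succ m ih =>
      intro hm
      by_cases hm0 : m = 0
      · subst hm0
        rw [show ((0 + 1 : Nat) : Int) = 1 by norm_num,
          PySem.List.pyRange_one_eq_nil (by norm_num), List.foldl_nil]
        exact map_range_congr _ _ _ (fun j hj => by
          by_cases h0 : j = 0
          · rw [if_pos (Or.inl h0), if_pos (Or.inl h0)]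
          · rw [if_neg (by omega), if_neg (by omega)])
      · have h1m : 1 ≤ m := Nat.one_le_iff_ne_zero.mpr hm0
        rw [show ((m + 1 : Nat) : Int) = (m : Int) + 1 by push_cast; ring,
          PySem.List.pyRange_one_succ_right (by exact_mod_cast h1m), List.foldl_append,
          ih (by omega), List.foldl_cons, List.foldl_nil,
          show ((m : Int) - 1) = ((m - 1 : Nat) : Int) by omega,
          PySem.List.pyGetD_natCast, PySem.List.pyGetD_natCast,
          getD_map_range_ite, getD_map_range_ite,
          if_pos (by omega : m - 1 < cs.length), if_pos (by omega : m < cs.length),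
          if_pos (by omega : m - 1 = 0 ∨ m - 1 < m), PySem.List.pySetD_natCast]
        apply set_map_range _ _ _ _ _ (by omega)
        · rw [if_pos (by omega)]
          have := Ssum_succ cs (m - 1)
          rw [show m - 1 + 1 = m by omega] at this
          rw [this]
        · intro j hjn hj
          by_cases hjm : j = 0 ∨ j < m
          · rw [if_pos hjm, if_pos (by omega)]
          · rw [if_neg hjm, if_neg (by omega)]
  rw [hinit, aux cs.length le_rfl]
  exact map_range_congr _ _ _ (fun j hj => by rw [if_pos (by omega)])

-- happy_rev characterization
lemma hrev_eq (cs : List Char) (hn : 1 ≤ cs.length) :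
    (PySem.List.pyRange ((cs.length : Int) - 2) (-1) (-1)).foldl (fun h i =>
      if PySem.List.pyGet? cs (i + 1) = PySem.List.pyGet? cs i then PySem.List.pySetD h i 1 else h)
      (List.replicate cs.length 0)
    = (List.range cs.length).map (Rind cs) := by
  have aux : ∀ m : Nat, m ≤ cs.length →
      (PySem.List.pyRange ((m : Int) - 1) (-1) (-1)).foldl (fun h i =>
        if PySem.List.pyGet? cs (i + 1) = PySem.List.pyGet? cs i then PySem.List.pySetD h i 1 else h)
        ((List.range cs.length).map (fun j => if m ≤ j then Rind cs j else 0))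
      = (List.range cs.length).map (Rind cs) := by
    intro m
    induction m with
    | zero =>
      rw [show ((0 : Nat) : Int) - 1 = -1 by norm_num]
      intro _
      rw [PySem.List.pyRange_neg_one_eq_nil (by norm_num), List.foldl_nil]
      exact map_range_congr _ _ _ (fun j hj => by rw [if_pos (by omega)])
    | succ m ih =>
      intro hm
      rw [show ((m + 1 : Nat) : Int) - 1 = (m : Int) by push_cast; ring,
        PySem.List.pyRange_neg_one_cons (by omega), List.foldl_cons,
        show ((m : Int) + 1) = ((m + 1 : Nat) : Int) by push_cast; ring,
        PySem.List.pyGet?_natCast, PySem.List.pyGet?_natCast]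
      by_cases hc : cs[m+1]? = cs[m]?
      · have hm1 : m + 1 < cs.length := by
          by_contra hcon
          rw [List.getElem?_eq_none_iff.mpr (by omega),
            List.getElem?_eq_getElem (by omega : m < cs.length)] at hc
          simp at hc
        have hset : ((List.range cs.length).map (fun j => if m + 1 ≤ j then Rind cs j else 0)).set m 1
            = (List.range cs.length).map (fun j => if m ≤ j then Rind cs j else 0) := by
          apply set_map_range _ _ _ _ _ (by omega)
          · rw [if_pos le_rfl]
            unfold Rind
            rw [if_pos ⟨hm1, hc⟩]
          · intro j hjn hj
            by_cases hjm : m + 1 ≤ j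
            · rw [if_pos hjm, if_pos (by omega)]
            · rw [if_neg hjm, if_neg (by omega)]
        rw [if_pos hc, PySem.List.pySetD_natCast, hset]
        exact ih (by omega)
      · have hcongr : (List.range cs.length).map (fun j => if m + 1 ≤ j then Rind cs j else 0)
            = (List.range cs.length).map (fun j => if m ≤ j then Rind cs j else 0) := by
          apply map_range_congr
          intro j hj
          by_cases hjm : j = m
          · subst hjm
            rw [if_neg (by omega), if_pos le_rfl]
            unfold Rind
            rw [if_neg (by rintro ⟨-, h⟩; exact hc h)]
          · by_cases hjm' : m + 1 ≤ j
            · rw [if_pos hjm', if_pos (by omega)]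
            · rw [if_neg hjm', if_neg (by omega)]
        rw [if_neg hc, hcongr]
        exact ih (by omega)
  have h2 : ((cs.length : Int) - 2) = ((cs.length - 1 : Nat) : Int) - 1 := by omega
  rw [h2, ← aux (cs.length - 1) (by omega)]
  congr 1
  rw [replicate_eq_map_range]
  exact map_range_congr _ _ _ (fun j hj => by
    by_cases hjm : cs.length - 1 ≤ j
    · rw [if_pos hjm]
      unfold Rind
      rw [if_neg (by rintro ⟨h, -⟩; omega)]
    · rw [if_neg hjm])

-- happy_rev_sum characterization
lemma hrevsum_eq (cs : List Char) (hn : 1 ≤ cs.length) :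
    (PySem.List.pyRange ((cs.length : Int) - 2) (-1) (-1)).foldl (fun h i =>
      PySem.List.pySetD h i (PySem.List.pyGetD h (i + 1) 0 +
        PySem.List.pyGetD ((List.range cs.length).map (Rind cs)) i 0))
      (PySem.List.pySetD (List.replicate cs.length 0) ((cs.length : Int) - 1)
        (PySem.List.pyGetD ((List.range cs.length).map (Rind cs)) ((cs.length : Int) - 1) 0))
    = (List.range cs.length).map (RSsum cs) := by
  have hinit : PySem.List.pySetD (List.replicate cs.length 0) ((cs.length : Int) - 1)
      (PySem.List.pyGetD ((List.range cs.length).map (Rind cs)) ((cs.length : Int) - 1) 0)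
      = (List.range cs.length).map (fun j => if cs.length - 1 ≤ j then RSsum cs j else 0) := by
    rw [show ((cs.length : Int) - 1) = ((cs.length - 1 : Nat) : Int) by omega,
      PySem.List.pySetD_natCast, PySem.List.pyGetD_natCast, getD_map_range_ite,
      if_pos (by omega), replicate_eq_map_range]
    apply set_map_range _ _ _ _ _ (by omega)
    · rw [if_pos le_rfl, RSsum_bot cs (cs.length - 1) (by omega),
        show cs.length - 1 + 1 = cs.length by omega, RSsum_len, add_zero]
    · intro j hjn hj
      rw [if_neg (by omega)]
  have aux : ∀ m : Nat, m ≤ cs.length →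
      (PySem.List.pyRange ((m : Int) - 1) (-1) (-1)).foldl (fun h i =>
        PySem.List.pySetD h i (PySem.List.pyGetD h (i + 1) 0 +
          PySem.List.pyGetD ((List.range cs.length).map (Rind cs)) i 0))
        ((List.range cs.length).map (fun j => if m ≤ j then RSsum cs j else 0))
      = (List.range cs.length).map (RSsum cs) := by
    intro m
    induction m with
    | zero =>
      rw [show ((0 : Nat) : Int) - 1 = -1 by norm_num]
      intro _
      rw [PySem.List.pyRange_neg_one_eq_nil (by norm_num), List.foldl_nil]
      exact map_range_congr _ _ _ (fun j hj => by rw [if_pos (by omega)])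
    | succ m ih =>
      intro hm
      have hval : PySem.List.pyGetD
          ((List.range cs.length).map (fun j => if m + 1 ≤ j then RSsum cs j else 0))
          ((m : Int) + 1) 0 = RSsum cs (m + 1) := by
        rw [show ((m : Int) + 1) = ((m + 1 : Nat) : Int) by push_cast; ring,
          PySem.List.pyGetD_natCast, getD_map_range_ite]
        by_cases hml : m + 1 < cs.length
        · rw [if_pos hml, if_pos le_rfl]
        · rw [if_neg hml, show m + 1 = cs.length by omega, RSsum_len]
      rw [show ((m + 1 : Nat) : Int) - 1 = (m : Int) by push_cast; ring,
        PySem.List.pyRange_neg_one_cons (by omega), List.foldl_cons, hval,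
        PySem.List.pyGetD_natCast, getD_map_range_ite, if_pos (by omega : m < cs.length),
        PySem.List.pySetD_natCast]
      have hset : ((List.range cs.length).map (fun j => if m + 1 ≤ j then RSsum cs j else 0)).set m
          (RSsum cs (m + 1) + Rind cs m)
          = (List.range cs.length).map (fun j => if m ≤ j then RSsum cs j else 0) := by
        apply set_map_range _ _ _ _ _ (by omega)
        · rw [if_pos le_rfl, RSsum_bot cs m (by omega)]
          ring
        · intro j hjn hj
          by_cases hjm : m + 1 ≤ j
          · rw [if_pos hjm, if_pos (by omega)]
          · rw [if_neg hjm, if_neg (by omega)]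
      rw [hset]
      exact ih (by omega)
  rw [hinit, show ((cs.length : Int) - 2) = ((cs.length - 1 : Nat) : Int) - 1 by omega]
  exact aux (cs.length - 1) (by omega)

-- the value A stores at position i of happy_k
def Kf (cs : List Char) (k : Int) (i : Nat) : Int :=
  Ssum cs i + (if (i : Int) + k < (cs.length : Int) then
    PySem.List.pyGetD ((List.range cs.length).map (RSsum cs)) ((i : Int) + k) 0 else 0)

-- happy_k characterization
lemma hk_eq (cs : List Char) (k : Int) :
    (PySem.List.pyRange 0 (cs.length : Int) 1).foldl (fun h i =>
      PySem.List.pySetD h i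
        (PySem.List.pyGetD ((List.range cs.length).map (Ssum cs)) i 0 +
          (if i + k < (cs.length : Int) then
            PySem.List.pyGetD ((List.range cs.length).map (RSsum cs)) (i + k) 0 else 0)))
      (List.replicate cs.length 0)
    = (List.range cs.length).map (Kf cs k) := by
  have aux : ∀ m : Nat, m ≤ cs.length →
      (PySem.List.pyRange 0 (m : Int) 1).foldl (fun h i =>
        PySem.List.pySetD h i
          (PySem.List.pyGetD ((List.range cs.length).map (Ssum cs)) i 0 +
            (if i + k < (cs.length : Int) then
              PySem.List.pyGetD ((List.range cs.length).map (RSsum cs)) (i + k) 0 else 0)))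
        (List.replicate cs.length 0)
      = (List.range cs.length).map (fun j => if j < m then Kf cs k j else 0) := by
    intro m
    induction m with
    | zero =>
      intro _
      rw [PySem.List.pyRange_one_eq_nil (by norm_num), List.foldl_nil, replicate_eq_map_range]
      exact map_range_congr _ _ _ (fun j hj => by rw [if_neg (by omega)])
    | succ m ih =>
      intro hm
      rw [show ((m + 1 : Nat) : Int) = (m : Int) + 1 by push_cast; ring,
        PySem.List.pyRange_one_succ_right (by omega), List.foldl_append,
        ih (by omega), List.foldl_cons, List.foldl_nil,
        PySem.List.pyGetD_natCast, getD_map_range_ite, if_pos (by omega : m < cs.length),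
        PySem.List.pySetD_natCast]
      apply set_map_range _ _ _ _ _ (by omega)
      · rw [if_pos (by omega)]; rfl
      · intro j hjn hj
        by_cases hjm : j < m
        · rw [if_pos hjm, if_pos (by omega)]
        · rw [if_neg hjm, if_neg (by omega)]
  rw [aux cs.length le_rfl]
  exact map_range_congr _ _ _ (fun j hj => by rw [if_pos hj])

-- indexing the suffix-sum list with a (possibly negative) in-range Python index
lemma getD_rs (cs : List Char) (hn : 1 ≤ cs.length) (idx : Int)
    (h1 : -(cs.length : Int) ≤ idx) (h2 : idx < (cs.length : Int)) :
    PySem.List.pyGetD ((List.range cs.length).map (RSsum cs)) idx 0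
    = Ssum cs (cs.length - 1) - PySem.List.pyGetD ((List.range cs.length).map (Ssum cs)) idx 0 := by
  by_cases h0 : 0 ≤ idx
  · have hidx : idx = ((idx.toNat : Nat) : Int) := by omega
    rw [hidx, PySem.List.pyGetD_natCast, PySem.List.pyGetD_natCast,
      getD_map_range_ite, getD_map_range_ite, if_pos (by omega), if_pos (by omega)]
    exact RS_eq_total_sub cs idx.toNat hn (by omega)
  · have hm : idx = -(((-idx).toNat : Nat) : Int) := by omega
    rw [hm, PySem.List.pyGetD_neg_natCast _ _ _ (by omega)
        (by rw [List.length_map, List.length_range]; omega),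
      PySem.List.pyGetD_neg_natCast _ _ _ (by omega)
        (by rw [List.length_map, List.length_range]; omega)]
    simp only [List.length_map, List.length_range, List.getElem_map, List.getElem_range]
    exact RS_eq_total_sub cs (cs.length - (-idx).toNat) hn (by omega)

-- indexing the prefix-sum list with an in-range Python index (both signs)
lemma getD_ss_nonneg (cs : List Char) (idx : Int) (h0 : 0 ≤ idx) (h2 : idx < (cs.length : Int)) :
    PySem.List.pyGetD ((List.range cs.length).map (Ssum cs)) idx 0 = Ssum cs idx.toNat := by
  rw [show idx = ((idx.toNat : Nat) : Int) by omega, PySem.List.pyGetD_natCast,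
    getD_map_range_ite, if_pos (by omega)]
  rw [Int.toNat_natCast]

lemma getD_ss_neg (cs : List Char) (idx : Int) (h1 : -(cs.length : Int) ≤ idx) (h0 : idx < 0) :
    PySem.List.pyGetD ((List.range cs.length).map (Ssum cs)) idx 0
    = Ssum cs (cs.length - (-idx).toNat) := by
  rw [show idx = -(((-idx).toNat : Nat) : Int) by omega,
    PySem.List.pyGetD_neg_natCast _ _ _ (by omega)
      (by rw [List.length_map, List.length_range]; omega)]
  simp only [List.length_map, List.length_range, List.getElem_map, List.getElem_range,
    neg_neg, Int.toNat_natCast]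

-- === B-side lemmas ===

-- the adjacent-pair test at Python index t, as Eind
lemma sub_Eind (cs : List Char) (t : Nat) (a : Int) (h1 : 1 ≤ t) :
    (if PySem.List.pyGet? cs ((t : Int) - 1) = PySem.List.pyGet? cs (t : Int)
     then a - 1 else a) = a - Eind cs t := by
  rw [show ((t : Int) - 1) = ((t - 1 : Nat) : Int) by omega,
    PySem.List.pyGet?_natCast, PySem.List.pyGet?_natCast]
  unfold Eind
  by_cases hc : cs[t-1]? = cs[t]?
  · rw [if_pos hc, if_pos ⟨by omega, hc⟩]
  · rw [if_neg hc, if_neg (by rintro ⟨-, h⟩; exact hc h)]; ring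

lemma add_Eind (cs : List Char) (t : Nat) (a : Int) (h1 : 1 ≤ t) :
    (if PySem.List.pyGet? cs ((t : Int) - 1) = PySem.List.pyGet? cs (t : Int)
     then a + 1 else a) = a + Eind cs t := by
  rw [show ((t : Int) - 1) = ((t - 1 : Nat) : Int) by omega,
    PySem.List.pyGet?_natCast, PySem.List.pyGet?_natCast]
  unfold Eind
  by_cases hc : cs[t-1]? = cs[t]?
  · rw [if_pos hc, if_pos ⟨by omega, hc⟩]
  · rw [if_neg hc, if_neg (by rintro ⟨-, h⟩; exact hc h)]; ring

-- B's counting loop over range(1, M) computes Ssum (M-1)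
lemma totloop (cs : List Char) : ∀ M : Nat,
    (PySem.List.pyRange 1 (M : Int) 1).foldl (fun t i =>
      if PySem.List.pyGet? cs (i - 1) = PySem.List.pyGet? cs i then t + 1 else t) 0
    = Ssum cs (M - 1) := by
  intro M
  induction M with
  | zero =>
    rw [PySem.List.pyRange_one_eq_nil (by norm_num), List.foldl_nil, Ssum_zero]
  | succ M ih =>
    by_cases hM : M = 0
    · subst hM
      rw [show ((0 + 1 : Nat) : Int) = 1 by norm_num,
        PySem.List.pyRange_one_eq_nil (by norm_num), List.foldl_nil, Ssum_zero]
    · rw [show ((M + 1 : Nat) : Int) = (M : Int) + 1 by push_cast; ring,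
        PySem.List.pyRange_one_succ_right (by omega), List.foldl_append, ih,
        List.foldl_cons, List.foldl_nil, add_Eind cs M _ (by omega),
        show M + 1 - 1 = (M - 1) + 1 by omega, Ssum_succ,
        show M - 1 + 1 = M by omega]

-- the sliding-window step identity
lemma Wf_succ (cs : List Char) (kn : Nat) (m : Nat) (hm : m + 1 ≤ cs.length - 1) :
    Wf cs kn (m + 1)
    = Wf cs kn m - Eind cs (m + 1) + (if m + 1 + kn < cs.length then Eind cs (m + 1 + kn) else 0) := by
  unfold Wf
  by_cases h : m + 1 + kn < cs.length
  · rw [if_pos h, min_eq_left (by omega), min_eq_left (by omega),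
      show m + 1 + kn = (m + kn) + 1 by omega, Ssum_succ, Ssum_succ]
    ring
  · rw [if_neg h, min_eq_right (by omega), min_eq_right (by omega), Ssum_succ]
    ring

-- B's sliding-window loop invariant
lemma pairloop (cs : List Char) (k : Int) (hk : 1 ≤ k) :
    ∀ m : Nat, m ≤ cs.length - 1 →
      (PySem.List.pyRange 1 ((m + 1 : Nat) : Int) 1).foldl (fun (wb : Int × Int) i =>
        let w1 := if PySem.List.pyGet? cs (i - 1) = PySem.List.pyGet? cs i then wb.1 - 1 else wb.1
        let w2 := if i + k < (cs.length : Int) ∧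
                    PySem.List.pyGet? cs (i + k - 1) = PySem.List.pyGet? cs (i + k)
                  then w1 + 1 else w1
        (w2, if w2 < wb.2 then w2 else wb.2)) (Wf cs k.toNat 0, Wf cs k.toNat 0)
      = (Wf cs k.toNat m, bstF (Wf cs k.toNat) m) := by
  intro m
  induction m with
  | zero =>
    intro _
    rw [show ((0 + 1 : Nat) : Int) = 1 by norm_num,
      PySem.List.pyRange_one_eq_nil (by norm_num), List.foldl_nil]
    rfl
  | succ m ih =>
    intro hm
    rw [show ((m + 1 + 1 : Nat) : Int) = ((m + 1 : Nat) : Int) + 1 by push_cast; ring,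
      PySem.List.pyRange_one_succ_right (by push_cast; omega), List.foldl_append,
      ih (by omega), List.foldl_cons, List.foldl_nil]
    simp only
    rw [sub_Eind cs (m + 1) _ (by omega)]
    have hidx : ((m + 1 : Nat) : Int) + k = ((m + 1 + k.toNat : Nat) : Int) := by
      push_cast; omega
    have hw2 : (if ((m + 1 : Nat) : Int) + k < (cs.length : Int) ∧
          PySem.List.pyGet? cs (((m + 1 : Nat) : Int) + k - 1)
            = PySem.List.pyGet? cs (((m + 1 : Nat) : Int) + k)
        then Wf cs k.toNat m - Eind cs (m + 1) + 1 else Wf cs k.toNat m - Eind cs (m + 1))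
        = Wf cs k.toNat (m + 1) := by
      rw [hidx]
      by_cases hc : m + 1 + k.toNat < cs.length
      · simp only [show ((m + 1 + k.toNat : Nat) : Int) < (cs.length : Int) from
          by exact_mod_cast hc, true_and]
        rw [add_Eind cs (m + 1 + k.toNat) _ (by omega),
          Wf_succ cs k.toNat m (by omega), if_pos hc]
      · rw [if_neg (by rintro ⟨h1, -⟩; exact hc (by exact_mod_cast h1)),
          Wf_succ cs k.toNat m (by omega), if_neg hc]
        ring
    rw [hw2]
    have hmin : (if Wf cs k.toNat (m + 1) < bstF (Wf cs k.toNat) m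
        then Wf cs k.toNat (m + 1) else bstF (Wf cs k.toNat) m)
        = bstF (Wf cs k.toNat) (m + 1) := by
      show _ = min (bstF (Wf cs k.toNat) m) (Wf cs k.toNat (m + 1))
      rcases lt_or_ge (Wf cs k.toNat (m + 1)) (bstF (Wf cs k.toNat) m) with h | h
      · rw [if_pos h, min_eq_right (le_of_lt h)]
      · rw [if_neg (not_lt.mpr h), min_eq_left h]
    rw [hmin]

-- A's max over (c - g i) is c minus B's running minimum
lemma foldl_max_sub (c : Int) (g : Nat → Int) : ∀ m : Nat,
    ((List.range' 1 m).map (fun i => c - g i)).foldl max (c - g 0) = c - bstF g m := by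
  intro m
  induction m with
  | zero => rfl
  | succ m ih =>
    rw [List.range'_concat, List.map_append, List.foldl_append, ih,
      List.map_singleton, List.foldl_cons, List.foldl_nil,
      show 1 + 1 * m = m + 1 by omega]
    show max (c - bstF g m) (c - g (m + 1)) = c - min (bstF g m) (g (m + 1))
    omega

lemma maxA (c : Int) (g : Nat → Int) (n : Nat) (hn : 1 ≤ n) :
    (PySem.List.max? ((List.range n).map (fun i => c - g i)) (fun x => x)).getD 0
    = c - bstF g (n - 1) := by
  obtain ⟨m, rfl⟩ : ∃ m, n = m + 1 := ⟨n - 1, by omega⟩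
  rw [List.range_eq_range', List.range'_succ, List.map_cons, PySem.List.max?_id_cons,
    Option.getD_some, foldl_max_sub]
  simp

lemma bstF_const : ∀ m : Nat, bstF (fun _ => (0 : Int)) m = 0 := by
  intro m
  induction m with
  | zero => rfl
  | succ m ih => show min (bstF (fun _ => (0:Int)) m) 0 = 0; rw [ih]; simp

-- A's happy_k value, rewritten through the prefix sums (valid on Pre_)
lemma Kf_char (cs : List Char) (k : Int) (hn : 1 ≤ cs.length) (hk : -(cs.length : Int) ≤ k)
    (i : Nat) :
    Kf cs k i = Ssum cs i + (if (i : Int) + k < (cs.length : Int) then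
      Ssum cs (cs.length - 1)
        - PySem.List.pyGetD ((List.range cs.length).map (Ssum cs)) ((i : Int) + k) 0 else 0) := by
  unfold Kf
  by_cases h : (i : Int) + k < (cs.length : Int)
  · rw [if_pos h, if_pos h, getD_rs cs hn ((i : Int) + k) (by omega) h]
  · rw [if_neg h, if_neg h]

-- A's value equals the max over Kf (the whole five-array computation collapses to this)
lemma solveA_eq (s : String) (k : Int) (hn : 1 ≤ s.toList.length) :
    solve s k
    = (PySem.List.max? ((List.range s.toList.length).map (Kf s.toList k)) (fun x => x)).getD 0 := by
  simp only [solve, PySem.Str.len_eq, Int.toNat_natCast]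
  rw [happy_eq s.toList, hsum_eq s.toList hn, hrev_eq s.toList hn, hrevsum_eq s.toList hn,
    hk_eq s.toList k]

-- B's total equals Ssum (n-1)
lemma solveB_total (s : String) :
    (PySem.List.pyRange 1 (PySem.Str.len s) 1).foldl (fun t i =>
      if PySem.List.pyGet? s.toList (i - 1) = PySem.List.pyGet? s.toList i then t + 1 else t) 0
    = Ssum s.toList (s.toList.length - 1) := by
  rw [PySem.Str.len_eq, totloop s.toList s.toList.length]

-- no adjacent equal pair ⇒ every prefix sum up to n-1 is 0
lemma nopair_Ssum (cs : List Char)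
    (hnp : ¬ (cs.zip (cs.drop 1)).any (fun p => p.1 == p.2) = true) :
    ∀ j : Nat, j < cs.length → Ssum cs j = 0 := by
  intro j hj
  unfold Ssum
  apply Finset.sum_eq_zero
  intro t ht
  have ht' : t ≤ j := by
    have := Finset.mem_range.mp ht; omega
  rcases Nat.eq_zero_or_pos t with h0 | h0
  · subst h0; exact Eind_zero cs
  · unfold Eind
    rw [if_neg]
    rintro ⟨-, hc⟩
    have h1 : t - 1 < cs.length := by omega
    have h2 : t < cs.length := by omega
    rw [List.getElem?_eq_getElem h1, List.getElem?_eq_getElem h2] at hc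
    have hc' : cs[t-1] = cs[t] := Option.some_inj.mp hc
    apply hnp
    rw [List.any_eq_true]
    refine ⟨(cs[t-1], cs[t]), ?_, by simpa using hc'⟩
    have hzl : t - 1 < (cs.zip (cs.drop 1)).length := by
      rw [List.length_zip, List.length_drop]; omega
    have : (cs.zip (cs.drop 1))[t-1] = (cs[t-1], cs[t]) := by
      rw [List.getElem_zip]
      congr 1
      rw [List.getElem_drop]
      congr 1
      omega
    rw [← this]
    exact List.getElem_mem hzl

-- one pair inside (a, b] forces the prefix sums strictly apart
lemma Ssum_pair_lower (cs : List Char) (a b t : Nat) (h1 : a < t) (h2 : t ≤ b) :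
    Ssum cs a + Eind cs t ≤ Ssum cs b := by
  unfold Ssum
  have hsub : ∑ u ∈ Finset.range (b + 1), Eind cs u
      = ∑ u ∈ Finset.range (a + 1), Eind cs u + ∑ u ∈ Finset.Ico (a + 1) (b + 1), Eind cs u := by
    rw [Finset.sum_range_add_sum_Ico _ (by omega)]
  rw [hsub]
  have : Eind cs t ≤ ∑ u ∈ Finset.Ico (a + 1) (b + 1), Eind cs u :=
    Finset.single_le_sum (fun u _ => Eind_nonneg cs u) (Finset.mem_Ico.mpr ⟨by omega, by omega⟩)
  omega

-- ===== VERDICT PROOFS =====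

theorem solve_spec : Claim_unchanged_solve := by
  intro s k _ hpre hnd
  obtain ⟨hn0, hk0⟩ := hpre
  have hn : 1 ≤ s.toList.length := by
    rw [PySem.Str.len_eq] at hn0; exact_mod_cast hn0
  have hkk : -(s.toList.length : Int) ≤ k := by
    rw [PySem.Str.len_eq] at hk0; exact hk0
  show solve s k = solve_alt s k
  rw [solveA_eq s k hn]
  by_cases hkpos : 1 ≤ k
  · -- main case: sliding window
    have hmap : (List.range s.toList.length).map (Kf s.toList k)
        = (List.range s.toList.length).map
            (fun i => Ssum s.toList (s.toList.length - 1) - Wf s.toList k.toNat i) := by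
      apply map_range_congr
      intro i hi
      rw [Kf_char s.toList k hn hkk i]
      by_cases h : (i : Int) + k < (s.toList.length : Int)
      · rw [if_pos h, getD_ss_nonneg s.toList _ (by omega) h]
        rw [show ((i : Int) + k).toNat = i + k.toNat by omega]
        unfold Wf
        rw [min_eq_left (by omega)]
        ring
      · rw [if_neg h]
        unfold Wf
        rw [min_eq_right (by omega)]
        ring
    rw [hmap, maxA _ _ s.toList.length hn]
    simp only [solve_alt]
    rw [if_neg (by omega), solveB_total s]
    have hwin : (PySem.List.pyRange 1 (min k (PySem.Str.len s - 1) + 1) 1).foldl (fun w i =>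
        if PySem.List.pyGet? s.toList (i - 1) = PySem.List.pyGet? s.toList i then w + 1 else w) 0
        = Wf s.toList k.toNat 0 := by
      rw [show min k (PySem.Str.len s - 1) + 1
          = (((min k.toNat (s.toList.length - 1)) + 1 : Nat) : Int) by
        rw [PySem.Str.len_eq]; push_cast; omega]
      rw [totloop s.toList]
      unfold Wf
      rw [Ssum_zero, Nat.zero_add, Nat.add_sub_cancel]
      ring
    rw [hwin]
    have hploop := pairloop s.toList k hkpos (s.toList.length - 1) le_rfl
    rw [show ((s.toList.length - 1 + 1 : Nat) : Int) = ((s.toList.length : Nat) : Int) by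
      omega] at hploop
    exact (congrArg (fun x => Ssum s.toList (s.toList.length - 1) - x)
      (congrArg Prod.snd hploop)).symm
  · -- k ≤ 0: B returns total, and every Kf i equals total
    have hconst : (List.range s.toList.length).map (Kf s.toList k)
        = (List.range s.toList.length).map
            (fun i => Ssum s.toList (s.toList.length - 1) - (fun _ => (0 : Int)) i) := by
      apply map_range_congr
      intro i hi
      rw [Kf_char s.toList k hn hkk i]
      have hlt : (i : Int) + k < (s.toList.length : Int) := by omega
      rw [if_pos hlt]
      by_cases hk0' : k = 0
      · subst hk0'
        rw [getD_ss_nonneg s.toList _ (by omega) hlt,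
          show ((i : Int) + 0).toNat = i by omega]
        ring
      · by_cases hkn : k = -(s.toList.length : Int)
        · -- k = -n: Python's wraparound lands back on index i
          subst hkn
          rw [getD_ss_neg s.toList _ (by omega) (by omega),
            show s.toList.length - (-(↑i + -(s.toList.length : Int))).toNat = i by omega]
          ring
        · -- -n < k < 0 and (from ¬ D_solve) no adjacent equal pair: everything is 0
          have hkrange : -(s.toList.length : Int) < k ∧ k < 0 := by
            constructor
            · rcases lt_or_eq_of_le hkk with h | h
              · exact h
              · exact absurd h.symm hkn
            · omega
          have hnp : ¬ (s.toList.zip (s.toList.drop 1)).any (fun p => p.1 == p.2) = true := by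
            intro hany
            refine hnd ⟨⟨?_, hkrange.2⟩, hany⟩
            rw [PySem.Str.len_eq]
            exact_mod_cast hkrange.1
          have hz : ∀ j : Nat, j < s.toList.length → Ssum s.toList j = 0 :=
            nopair_Ssum s.toList hnp
          by_cases hnonneg : (0 : Int) ≤ (i : Int) + k
          · rw [getD_ss_nonneg s.toList _ hnonneg hlt, hz _ (by omega), hz _ (by omega),
              hz _ (by omega)]
            ring
          · rw [getD_ss_neg s.toList _ (by omega) (by omega), hz _ (by omega),
              hz _ (by omega), hz _ (by omega)]
            ring
    rw [hconst, maxA _ _ s.toList.length hn, bstF_const]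
    simp only [solve_alt]
    rw [if_pos (by omega), solveB_total s]
    ring

theorem solve_changed : Claim_changed_solve := by
  unfold Claim_changed_solve; decide

theorem solve_tight : Claim_exact_solve := by
  intro s k _ hpre hd
  obtain ⟨hn0, hk0⟩ := hpre
  obtain ⟨⟨hk1, hk2⟩, hany⟩ := hd
  have hn : 1 ≤ s.toList.length := by
    rw [PySem.Str.len_eq] at hn0; exact_mod_cast hn0
  have hk1' : -(s.toList.length : Int) < k := by
    rw [PySem.Str.len_eq] at hk1; exact_mod_cast hk1
  -- B returns the total
  have hB : solve_alt s k = Ssum s.toList (s.toList.length - 1) := by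
    simp only [solve_alt]
    rw [if_pos (by omega), solveB_total s]
  -- extract a pair position t = j + 1, 1 ≤ t ≤ n - 1, with cs[t-1] = cs[t]
  obtain ⟨p, hpmem, hpeq⟩ := List.any_eq_true.mp hany
  obtain ⟨j, hjlt, hjget⟩ := List.mem_iff_getElem.mp hpmem
  have hjlt' : j < s.toList.length - 1 := by
    rw [List.length_zip, List.length_drop] at hjlt; omega
  have hpair : s.toList[j]'(by omega) = s.toList[j+1]'(by omega) := by
    have hg : (s.toList.zip (s.toList.drop 1))[j]'hjlt
        = (s.toList[j]'(by omega), s.toList[j+1]'(by omega)) := by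
      rw [List.getElem_zip]
      congr 1
      rw [List.getElem_drop]
      congr 1
      omega
    rw [hg] at hjget
    have h1 : p.1 = s.toList[j]'(by omega) := by rw [← hjget]
    have h2 : p.2 = s.toList[j+1]'(by omega) := by rw [← hjget]
    have := of_decide_eq_true hpeq
    rw [h1, h2] at this
    exact_mod_cast this
  have hE : Eind s.toList (j + 1) = 1 := by
    unfold Eind
    rw [if_pos ⟨by omega, by
      rw [show j + 1 - 1 = j by omega,
        List.getElem?_eq_getElem (by omega : j < s.toList.length),
        List.getElem?_eq_getElem (by omega : j + 1 < s.toList.length)]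
      exact congrArg some hpair⟩]
  have hK1 : 1 ≤ (-k).toNat := by omega
  have hKn : (-k).toNat ≤ s.toList.length - 1 := by omega
  -- the index at which A's value exceeds the total
  have hin : max (j + 1) (-k).toNat < s.toList.length := by omega
  rw [solveA_eq s k hn]
  have hmem : Kf s.toList k (max (j + 1) (-k).toNat)
      ∈ (List.range s.toList.length).map (Kf s.toList k) :=
    List.mem_map.mpr ⟨_, List.mem_range.mpr hin, rfl⟩
  rcases hmax : PySem.List.max? ((List.range s.toList.length).map (Kf s.toList k))
      (fun x => x) with _ | m
  · exfalso
    rw [PySem.List.max?_eq_none_iff] at hmax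
    rw [hmax] at hmem
    exact absurd hmem (List.not_mem_nil)
  · have hle : Kf s.toList k (max (j + 1) (-k).toNat) ≤ m :=
      PySem.List.max?_isMax hmax _ hmem
    have hKfi : Kf s.toList k (max (j + 1) (-k).toNat)
        = Ssum s.toList (max (j + 1) (-k).toNat)
          + (Ssum s.toList (s.toList.length - 1)
              - Ssum s.toList (max (j + 1) (-k).toNat - (-k).toNat)) := by
      rw [Kf_char s.toList k hn (by omega) _]
      have hlt : ((max (j + 1) (-k).toNat : Nat) : Int) + k < (s.toList.length : Int) := by
        have : (max (j + 1) (-k).toNat : Nat) < s.toList.length := hin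
        omega
      rw [if_pos hlt, getD_ss_nonneg s.toList _ (by omega) hlt,
        show (((max (j + 1) (-k).toNat : Nat) : Int) + k).toNat
          = max (j + 1) (-k).toNat - (-k).toNat by omega]
    have hgap : Ssum s.toList (max (j + 1) (-k).toNat - (-k).toNat) + 1
        ≤ Ssum s.toList (max (j + 1) (-k).toNat) := by
      have := Ssum_pair_lower s.toList (max (j + 1) (-k).toNat - (-k).toNat)
        (max (j + 1) (-k).toNat) (j + 1) (by omega) (by omega)
      omega
    rw [Option.getD_some, hB]
    omega
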